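-- pv_equiv track=rewrite | github.com/NIHARSIMHADRI/Route-Runner-Data | path_traverser.py | find_good_parents
-- ===== SOURCE A (Python) =====
-- def find_good_parents(fitnesses, index):
--
--     these_points = fitnesses[index][0]
--     curr_path_bools = []
--
--     for x in range(len(fitnesses)):
--         if x == index:
--             curr_path_bools.append(False)
--         else:
--             other_points = fitnesses[x][0]
--             curr_path_bools.append(intersection_exists(these_points, other_points))
--     return curr_path_bools
--
-- def intersection_exists(list1, list2):
--     set1, set2 = set(list1), set(list2)
--     # Iterate over the smaller set for efficiency
--     if len(set1) > len(set2):
--         set1, set2 = set2, set1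
--     for element in set1:
--         if element in set2:
--             return True  # Early exit
--     return False
-- ===== SOURCE B (Python) =====
-- def find_good_parents(fitnesses, index):
--     # Inverted index: point -> set of path indices containing it; one pass over all paths.
--     point_to_paths = {}
--     for i, path in enumerate(fitnesses):
--         for p in path[0]:
--             point_to_paths.setdefault(p, set()).add(i)
--     shared = set()
--     for p in fitnesses[index][0]:
--         shared |= point_to_paths.get(p, set())
--     return [i in shared and i != index for i in range(len(fitnesses))]
-- ===== Notes on version B (the rewrite author's own statement) =====
-- stated objective: alternative
-- what changed: B replaces A's per-path intersection tests with an inverted index built in one pass (point -> set of path indices), unions the index entries of the target's points into one shared set, and emits the booleans by membership in that set.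
import Mathlib
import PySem

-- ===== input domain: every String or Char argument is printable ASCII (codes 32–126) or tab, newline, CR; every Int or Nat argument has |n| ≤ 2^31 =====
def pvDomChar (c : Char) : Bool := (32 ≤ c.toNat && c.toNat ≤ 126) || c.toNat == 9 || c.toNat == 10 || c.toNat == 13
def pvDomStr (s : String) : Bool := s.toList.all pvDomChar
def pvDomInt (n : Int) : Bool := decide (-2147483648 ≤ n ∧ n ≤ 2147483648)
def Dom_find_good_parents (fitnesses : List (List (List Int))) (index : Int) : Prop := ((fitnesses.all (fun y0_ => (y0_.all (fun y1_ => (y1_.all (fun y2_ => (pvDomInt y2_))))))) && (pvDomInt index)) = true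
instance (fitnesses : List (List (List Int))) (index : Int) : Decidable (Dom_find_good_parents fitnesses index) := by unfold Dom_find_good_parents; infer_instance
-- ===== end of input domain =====

-- B builds an inverted index point → set of path indices and answers by set membership;
-- A scans each other path and tests pairwise intersection. Equivalence is on the return value.

-- ===== PORT A =====
def intersection_exists (list1 list2 : List Int) : Bool :=
  let set1 := PySem.Set.ofList list1
  let set2 := PySem.Set.ofList list2
  -- Python swaps so it iterates over the smaller set; the any-result is order-independent
  let pair := if PySem.Set.len set1 > PySem.Set.len set2 then (set2, set1) else (set1, set2)
  pair.1.any (fun element => PySem.Set.contains pair.2 element)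

def find_good_parents (fitnesses : List (List (List Int))) (index : Int) : List Bool :=
  -- fitnesses[index][0] and fitnesses[x][0]: IndexError outside Pre_, so pyGetD is exact there
  let these_points := PySem.List.pyGetD (PySem.List.pyGetD fitnesses index []) 0 []
  (PySem.List.pyRange 0 (PySem.List.len fitnesses) 1).foldl
    (fun curr_path_bools x =>
      if x == index then curr_path_bools ++ [false]
      else
        let other_points := PySem.List.pyGetD (PySem.List.pyGetD fitnesses x []) 0 []
        curr_path_bools ++ [intersection_exists these_points other_points])
    []

-- ===== PORT B =====
def find_good_parents_alt (fitnesses : List (List (List Int))) (index : Int) : List Bool :=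
  -- point_to_paths.setdefault(p, set()).add(i)  =  modify p ∅ (·.add i)
  let point_to_paths : PySem.Dict Int (PySem.Set Int) :=
    (PySem.List.enumerate fitnesses 0).foldl
      (fun d ip =>
        (PySem.List.pyGetD ip.2 0 []).foldl
          (fun d p => d.modify p PySem.Set.empty (fun s => PySem.Set.add s ip.1)) d)
      PySem.Dict.empty
  let shared : PySem.Set Int :=
    (PySem.List.pyGetD (PySem.List.pyGetD fitnesses index []) 0 []).foldl
      (fun s p => PySem.Set.union s (point_to_paths.getD p PySem.Set.empty))
      PySem.Set.empty
  (PySem.List.pyRange 0 (PySem.List.len fitnesses) 1).map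
    (fun i => PySem.Set.contains shared i && !(i == index))

-- ===== PRECONDITION & SPEC =====
-- Pre_ excludes exactly the inputs where Python A raises IndexError: index out of range,
-- or some path is the empty list (fitnesses[x][0] fails).
def Pre_find_good_parents (fitnesses : List (List (List Int))) (index : Int) : Prop :=
  PySem.Raise.InRange fitnesses.length index ∧ ∀ path ∈ fitnesses, path ≠ []
instance (fitnesses : List (List (List Int))) (index : Int) : Decidable (Pre_find_good_parents fitnesses index) := by unfold Pre_find_good_parents; infer_instance

def pvWitness_find_good_parents : List (List (List Int)) × Int := ([[[1, 2]], [[2, 3]], [[4]]], 0)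

def Spec_find_good_parents (fitnesses : List (List (List Int))) (index : Int) (out : List Bool) : Prop := out = find_good_parents_alt fitnesses index
instance (fitnesses : List (List (List Int))) (index : Int) (out : List Bool) : Decidable (Spec_find_good_parents fitnesses index out) := by unfold Spec_find_good_parents; infer_instance

-- ===== CLAIM (what is proved, stated in full; the proofs are below) =====
def Claim_equal_find_good_parents : Prop := ∀ (fitnesses : List (List (List Int))) (index : Int), Dom_find_good_parents fitnesses index → Pre_find_good_parents fitnesses index → Spec_find_good_parents fitnesses index (find_good_parents fitnesses index)

-- ===== LEMMAS AND PROOFS =====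

-- A's pairwise test is exactly "some element is in both lists"
lemma intersection_exists_iff (l1 l2 : List Int) :
    intersection_exists l1 l2 = decide (∃ e, e ∈ l1 ∧ e ∈ l2) := by
  unfold intersection_exists
  dsimp only
  split
  · rw [Bool.eq_iff_iff]
    simp only [List.any_eq_true, PySem.Set.contains_iff, PySem.Set.mem_ofList,
      decide_eq_true_eq]
    exact ⟨fun ⟨e, h1, h2⟩ => ⟨e, h2, h1⟩, fun ⟨e, h1, h2⟩ => ⟨e, h2, h1⟩⟩
  · rw [Bool.eq_iff_iff]
    simp only [List.any_eq_true, PySem.Set.contains_iff, PySem.Set.mem_ofList,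
      decide_eq_true_eq]

-- membership in the index entry after the inner loop over one path's points
lemma mem_inner_fold (ps : List Int) (d : PySem.Dict Int (PySem.Set Int)) (i q j : Int) :
    j ∈ (ps.foldl (fun d p => d.modify p PySem.Set.empty (fun s => PySem.Set.add s i)) d).getD q PySem.Set.empty
      ↔ j ∈ d.getD q PySem.Set.empty ∨ (j = i ∧ q ∈ ps) := by
  induction ps generalizing d with
  | nil => simp
  | cons p ps ih =>
    simp only [List.foldl_cons, ih, PySem.Dict.getD_modify]
    by_cases hq : q = p
    · simp [hq]; tauto
    · simp [hq]

-- membership in the inverted index built over all (index, path) pairs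
lemma mem_index_fold (l : List (List (List Int))) (s : Int) (d : PySem.Dict Int (PySem.Set Int)) (q j : Int) :
    j ∈ ((PySem.List.enumerate l s).foldl
          (fun d ip => (PySem.List.pyGetD ip.2 0 []).foldl
            (fun d p => d.modify p PySem.Set.empty (fun t => PySem.Set.add t ip.1)) d)
          d).getD q PySem.Set.empty
      ↔ j ∈ d.getD q PySem.Set.empty ∨
        ∃ k : Nat, k < l.length ∧ j = s + k ∧ q ∈ PySem.List.pyGetD l[k]! 0 [] := by
  induction l generalizing s d with
  | nil => simp
  | cons path l ih =>
    rw [PySem.List.enumerate_cons, List.foldl_cons, ih, mem_inner_fold]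
    constructor
    · rintro ((h | ⟨hj, hq⟩) | ⟨k, hk, hj, hq⟩)
      · exact Or.inl h
      · exact Or.inr ⟨0, by simp, by rw [hj]; simp, by simpa using hq⟩
      · refine Or.inr ⟨k + 1, by simp only [List.length_cons]; omega, ?_, by simpa using hq⟩
        rw [hj]; push_cast; ring
    · rintro (h | ⟨k, hk, hj, hq⟩)
      · exact Or.inl (Or.inl h)
      · cases k with
        | zero => exact Or.inl (Or.inr ⟨by omega, by simpa using hq⟩)
        | succ k =>
          refine Or.inr ⟨k, by simp only [List.length_cons] at hk; omega, ?_, by simpa using hq⟩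
          rw [hj]; push_cast; ring

-- membership in the shared set built by unioning index entries of the target's points
lemma mem_shared_fold (tp : List Int) (g : Int → PySem.Set Int) (acc : PySem.Set Int) (j : Int) :
    j ∈ tp.foldl (fun s p => PySem.Set.union s (g p)) acc
      ↔ j ∈ acc ∨ ∃ p ∈ tp, j ∈ g p := by
  induction tp generalizing acc with
  | nil => simp
  | cons p tp ih => simp [List.foldl_cons, ih, PySem.Set.mem_union]; tauto

-- ===== VERDICT (by name: the statement is the Claim_ definition above) =====
-- pointwise fact: B's membership bit equals A's intersection test, for an in-range x ≠ index
lemma pointwise_eq (fitnesses : List (List (List Int))) (index x : Int)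
    (hx0 : 0 ≤ x) (hxl : x < (fitnesses.length : Int)) :
    intersection_exists (PySem.List.pyGetD (PySem.List.pyGetD fitnesses index []) 0 [])
      (PySem.List.pyGetD (PySem.List.pyGetD fitnesses x []) 0 []) =
    PySem.Set.contains
      ((PySem.List.pyGetD (PySem.List.pyGetD fitnesses index []) 0 []).foldl
        (fun s p => PySem.Set.union s
          (((PySem.List.enumerate fitnesses 0).foldl
              (fun d ip => (PySem.List.pyGetD ip.2 0 []).foldl
                (fun d p => d.modify p PySem.Set.empty (fun t => PySem.Set.add t ip.1)) d)
              PySem.Dict.empty).getD p PySem.Set.empty))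
        PySem.Set.empty) x := by
  rw [intersection_exists_iff, Bool.eq_iff_iff]
  simp only [decide_eq_true_eq, PySem.Set.contains_iff]
  rw [mem_shared_fold]
  constructor
  · rintro ⟨e, he1, he2⟩
    refine Or.inr ⟨e, he1, ?_⟩
    rw [mem_index_fold]
    refine Or.inr ⟨x.toNat, by omega, by omega, ?_⟩
    rw [getElem!_pos fitnesses x.toNat (by omega)]
    rwa [PySem.List.pyGetD_eq_getElem fitnesses ([] : List (List Int)) hx0 (by simpa using hxl)] at he2
  · rintro (h | ⟨p, hp, hmem⟩)
    · simp [PySem.Set.empty] at h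
    · rw [mem_index_fold] at hmem
      rcases hmem with h | ⟨k, hk, hxk, hq⟩
      · simp [PySem.Set.empty] at h
      · refine ⟨p, hp, ?_⟩
        rw [getElem!_pos fitnesses k hk] at hq
        rw [PySem.List.pyGetD_eq_getElem fitnesses ([] : List (List Int)) hx0 (by simpa using hxl)]
        have hkx : x.toNat = k := by omega
        subst hkx
        exact hq

-- ===== VERDICT (by name: the statement is the Claim_ definition above) =====
theorem find_good_parents_spec : Claim_equal_find_good_parents := by
  intro fitnesses index _ _
  unfold Spec_find_good_parents find_good_parents find_good_parents_alt
  dsimp only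
  rw [PySem.List.foldl_congr_mem'
        (PySem.List.pyRange 0 (PySem.List.len fitnesses) 1) _
        (fun acc x => acc ++
          [if x == index then false
           else intersection_exists (PySem.List.pyGetD (PySem.List.pyGetD fitnesses index []) 0 [])
                  (PySem.List.pyGetD (PySem.List.pyGetD fitnesses x []) 0 [])])
        []
        (by intro x _ acc; by_cases h : x == index <;> simp [h]),
      PySem.List.foldl_append_singleton_eq_map, List.nil_append]
  refine List.map_congr_left ?_
  intro x hx
  rw [PySem.List.mem_pyRange_one] at hx
  by_cases hxi : x = index
  · simp [hxi]
  · have hne : (x == index) = false := by simpa using hxi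
    rw [hne, if_neg (by simp)]
    simp only [Bool.not_false, Bool.and_true]
    exact pointwise_eq fitnesses index x hx.1 (by simpa using hx.2)
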